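-- pv_equiv track=rewrite | github.com/olibdpro/ssh_over_clipboard | src/gitssh/audio_pipewire_runtime.py | _parse_pw_link_ports
-- ===== SOURCE A (Python) =====
-- def _parse_pw_link_ports(output: str) -> list[str]:
--     ports: list[str] = []
--     for raw in output.splitlines():
--         line = raw.strip()
--         if not line:
--             continue
--         token = ""
--         for part in line.split():
--             if ":" in part:
--                 token = part
--                 break
--         # Some pw-link versions print "id:port" while others include "node:port" forms
--         # or prefixes like "input"/"output". Keep the left-most token containing ':'.
--         if token:
--             ports.append(token.rstrip(","))
--     return ports
-- ===== SOURCE B (Python) =====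
-- # Single forward character scan: tracks the current whitespace-delimited token and the
-- # first colon-bearing token of the current line; no splitlines/strip/split passes.
-- def _parse_pw_link_ports(output: str) -> list[str]:
--     ports = []
--     token = ""
--     line_tok = None
--     for ch in output:
--         if ch in " \t\n\r":
--             if line_tok is None and ":" in token:
--                 line_tok = token
--             token = ""
--             if ch in "\n\r":
--                 if line_tok is not None:
--                     ports.append(line_tok.rstrip(","))
--                 line_tok = None
--         else:
--             token += ch
--     if line_tok is None and ":" in token:
--         line_tok = token
--     if line_tok is not None:
--         ports.append(line_tok.rstrip(","))
--     return ports
-- ===== Notes on version B (the rewrite author's own statement) =====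
-- stated objective: alternative
-- what changed: Replaced the splitlines/strip/split-per-line nested passes by a single forward character scan that maintains the current token and the first colon-bearing token of the current line.
import Mathlib
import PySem

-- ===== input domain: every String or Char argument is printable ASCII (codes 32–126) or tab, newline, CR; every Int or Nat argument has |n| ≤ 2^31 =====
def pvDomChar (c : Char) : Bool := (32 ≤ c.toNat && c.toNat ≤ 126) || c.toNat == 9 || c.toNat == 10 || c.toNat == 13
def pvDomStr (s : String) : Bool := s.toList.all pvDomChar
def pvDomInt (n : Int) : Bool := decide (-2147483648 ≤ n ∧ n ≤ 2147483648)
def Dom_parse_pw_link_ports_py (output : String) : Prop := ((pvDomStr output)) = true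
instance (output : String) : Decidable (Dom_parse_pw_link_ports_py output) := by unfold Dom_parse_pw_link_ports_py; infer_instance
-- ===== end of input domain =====

-- B replaces A's splitlines/strip/split nested passes by a single forward character scan
-- (objective: alternative); the equivalence below is about the return value.

-- ===== PORT A =====
-- token.rstrip(",") ported by hand: drop the trailing run of ',' (exact for str.rstrip with a chars argument)
def pvRstripComma (s : List Char) : List Char := (s.reverse.dropWhile (fun c => c == ',')).reverse

-- the inner `for part in line.split(): if ":" in part: token = part; break` loop (token = "" when no part matches)
def pvFirstColonTok : List (List Char) → List Char
  | [] => []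
  | p :: rest => if PySem.Chars.isIn [':'] p then p else pvFirstColonTok rest

-- one iteration of A's outer loop body
def pvALine (ports : List (List Char)) (raw : List Char) : List (List Char) :=
  let line := PySem.Chars.strip raw
  if line.isEmpty then ports
  else
    let token := pvFirstColonTok (PySem.Chars.split₀ line)
    if token.isEmpty then ports else ports ++ [pvRstripComma token]

def parse_pw_link_ports_py (output : String) : List String :=
  ((PySem.Chars.splitlines output.toList).foldl pvALine []).map String.ofList

-- ===== PORT B =====
-- Source B's loop body; `":" in token` is element membership for the single character ':' (exact)
def pvBStep (st : List (List Char) × List Char × Option (List Char)) (c : Char) :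
    List (List Char) × List Char × Option (List Char) :=
  let (ports, token, lineTok) := st
  if [' ', '\t', '\n', '\r'].contains c then
    let lineTok := if lineTok = none ∧ token.contains ':' then some token else lineTok
    if ['\n', '\r'].contains c then
      (match lineTok with
       | some t => ports ++ [pvRstripComma t]
       | none => ports, [], none)
    else (ports, [], lineTok)
  else (ports, token ++ [c], lineTok)

-- Source B's code after the loop
def pvBFinish (st : List (List Char) × List Char × Option (List Char)) : List (List Char) :=
  let (ports, token, lineTok) := st
  let lineTok := if lineTok = none ∧ token.contains ':' then some token else lineTok
  match lineTok with
  | some t => ports ++ [pvRstripComma t]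
  | none => ports

def parse_pw_link_ports_py_alt (output : String) : List String :=
  (pvBFinish (output.toList.foldl pvBStep ([], [], none))).map String.ofList

-- ===== PRECONDITION & SPEC =====
def Spec_parse_pw_link_ports_py (output : String) (out : List String) : Prop := out = parse_pw_link_ports_py_alt output
instance (output : String) (out : List String) : Decidable (Spec_parse_pw_link_ports_py output out) := by unfold Spec_parse_pw_link_ports_py; infer_instance

-- ===== CLAIM (what is proved, stated in full; the proofs are below) =====
def Claim_equal_parse_pw_link_ports_py : Prop := ∀ (output : String), Dom_parse_pw_link_ports_py output → Spec_parse_pw_link_ports_py output (parse_pw_link_ports_py output)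

-- ===== LEMMAS AND PROOFS =====

-- proof-only helpers ------------------------------------------------------

-- B's per-line state transition (current token, first colon token of the line)
def pvStep2 (st : List Char × Option (List Char)) (c : Char) : List Char × Option (List Char) :=
  let (token, lineTok) := st
  if PySem.Chars.isspace c then
    ([], if lineTok = none ∧ token.contains ':' then some token else lineTok)
  else (token ++ [c], lineTok)

def pvFin (st : List Char × Option (List Char)) : Option (List Char) :=
  if st.2 = none ∧ st.1.contains ':' then some st.1 else st.2

def pvFlushOut (st : List Char × Option (List Char)) : List (List Char) :=
  match pvFin st with
  | some t => [pvRstripComma t]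
  | none => []

def pvLineOK (c : Char) : Prop := pvDomChar c = true ∧ c ≠ '\n' ∧ c ≠ '\r'

-- character facts ---------------------------------------------------------

theorem pv_char_eq_iff (c d : Char) : (c = d) ↔ c.toNat = d.toNat :=
  ⟨fun h => by rw [h], fun h => Char.ext (UInt32.toNat_inj.mp h)⟩

theorem pv_dom_arith (c : Char) (hd : pvDomChar c = true) :
    (32 ≤ c.toNat ∧ c.toNat ≤ 126) ∨ c.toNat = 9 ∨ c.toNat = 10 ∨ c.toNat = 13 := by
  unfold pvDomChar at hd; simp at hd; tauto

theorem pv_isIn_colon (p : List Char) : PySem.Chars.isIn [':'] p = p.contains ':' := by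
  rcases h : p.contains ':' with _ | _
  · simp at h
    rw [PySem.Chars.isIn_eq_false_iff]
    intro hin; exact h (hin.subset (by simp))
  · simp at h
    rw [PySem.Chars.isIn_iff_infix]
    obtain ⟨s, t, rfl⟩ := List.append_of_mem h
    exact ⟨s, t, by simp⟩

theorem pv_space_eq (c : Char) (hd : pvDomChar c = true) (h1 : c ≠ '\n') (h2 : c ≠ '\r') :
    ([' ', '\t', '\n', '\r'].contains c) = PySem.Chars.isspace c := by
  have h10 : c.toNat ≠ 10 := fun h => h1 ((pv_char_eq_iff c '\n').mpr h)
  have h13 : c.toNat ≠ 13 := fun h => h2 ((pv_char_eq_iff c '\r').mpr h)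
  have hd' := pv_dom_arith c hd
  have hc : ([' ', '\t', '\n', '\r'].contains c) = decide (c ∈ [' ', '\t', '\n', '\r']) := by simp
  rw [hc]
  unfold PySem.Chars.isspace
  simp only [List.mem_cons, List.not_mem_nil, or_false, pv_char_eq_iff, ← Bool.decide_or,
    ← Bool.decide_and, show (' '.toNat = 32) from rfl, show ('\t'.toNat = 9) from rfl,
    show ('\n'.toNat = 10) from rfl, show ('\r'.toNat = 13) from rfl]
  exact decide_eq_decide.mpr (by constructor <;> (intro h; omega))

theorem pv_break_eq (isB : Char → Bool)
    (hB : isB = fun c =>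
      have n := c.toNat
      decide (n = 10) || decide (n = 13) || decide (n = 11) || decide (n = 12) || decide (n = 28) || decide (n = 29) ||
              decide (n = 30) ||
            decide (n = 133) ||
          decide (n = 8232) ||
        decide (n = 8233))
    (c : Char) (hd : pvDomChar c = true) :
    isB c = (decide (c = '\n') || decide (c = '\r')) := by
  have hd' := pv_dom_arith c hd
  subst hB
  simp only [pv_char_eq_iff, ← Bool.decide_or, show ('\n'.toNat = 10) from rfl,
    show ('\r'.toNat = 13) from rfl]
  exact decide_eq_decide.mpr (by constructor <;> (intro h; omega))

-- split₀.go facts ---------------------------------------------------------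

theorem pv_sg_nil (cur : List Char) (acc : List (List Char)) :
    PySem.Chars.split₀.go [] cur acc = (if cur.isEmpty then acc.reverse else (cur.reverse :: acc).reverse) := by
  simp [PySem.Chars.split₀.go]

theorem pv_sg_cons (c : Char) (rest cur : List Char) (acc : List (List Char)) :
    PySem.Chars.split₀.go (c :: rest) cur acc =
      (if PySem.Chars.isspace c then
        (if cur.isEmpty then PySem.Chars.split₀.go rest [] acc
         else PySem.Chars.split₀.go rest [] (cur.reverse :: acc))
       else PySem.Chars.split₀.go rest (c :: cur) acc) := by
  rw [PySem.Chars.split₀.go]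

theorem pv_sg_acc (s : List Char) : ∀ (cur : List Char) (acc : List (List Char)),
    PySem.Chars.split₀.go s cur acc = acc.reverse ++ PySem.Chars.split₀.go s cur [] := by
  induction s with
  | nil => intro cur acc; rw [pv_sg_nil, pv_sg_nil]; by_cases h : cur.isEmpty <;> simp [h]
  | cons c rest ih =>
    intro cur acc
    rw [pv_sg_cons, pv_sg_cons]
    by_cases hsp : PySem.Chars.isspace c
    · by_cases hcur : cur.isEmpty
      · simp only [hsp, hcur, if_true]
        exact ih [] acc
      · simp only [hsp, hcur, if_true, if_false]
        rw [ih [] (cur.reverse :: acc), ih [] [cur.reverse]]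
        simp
    · simp only [hsp, if_false]
      exact ih (c :: cur) acc

theorem pv_sg_trailing (ss : List Char) (hss : ∀ c ∈ ss, PySem.Chars.isspace c = true) :
    ∀ (cur : List Char) (acc : List (List Char)),
    PySem.Chars.split₀.go ss cur acc = PySem.Chars.split₀.go [] cur acc := by
  induction ss with
  | nil => intro cur acc; rfl
  | cons c rest ih =>
    intro cur acc
    have hsp : PySem.Chars.isspace c = true := hss c (by simp)
    have ih' := ih (fun d hd => hss d (by simp [hd]))
    rw [pv_sg_cons]
    by_cases hcur : cur.isEmpty
    · have : cur = [] := List.isEmpty_iff.mp hcur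
      subst this
      simp only [hsp, if_true, List.isEmpty_nil]
      rw [ih' [] acc]
    · simp only [hsp, hcur, if_true, if_false]
      rw [ih' [] (cur.reverse :: acc), pv_sg_nil, pv_sg_nil]
      simp [hcur]

theorem pv_sg_append_sp (l : List Char) (ss : List Char) (hss : ∀ c ∈ ss, PySem.Chars.isspace c = true) :
    ∀ (cur : List Char) (acc : List (List Char)),
    PySem.Chars.split₀.go (l ++ ss) cur acc = PySem.Chars.split₀.go l cur acc := by
  induction l with
  | nil =>
    intro cur acc
    simpa using pv_sg_trailing ss hss cur acc
  | cons c rest ih =>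
    intro cur acc
    rw [List.cons_append, pv_sg_cons, pv_sg_cons]
    by_cases hsp : PySem.Chars.isspace c
    · by_cases hcur : cur.isEmpty <;> simp only [hsp, hcur, if_true, if_false] <;> apply ih
    · simp only [hsp, if_false]; apply ih

theorem pv_sg_leading (ss : List Char) (hss : ∀ c ∈ ss, PySem.Chars.isspace c = true) :
    ∀ (l : List Char) (acc : List (List Char)),
    PySem.Chars.split₀.go (ss ++ l) [] acc = PySem.Chars.split₀.go l [] acc := by
  induction ss with
  | nil => intro l acc; rfl
  | cons c rest ih =>
    intro l acc
    have hsp : PySem.Chars.isspace c = true := hss c (by simp)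
    rw [List.cons_append, pv_sg_cons]
    simp only [hsp, if_true, List.isEmpty_nil]
    exact ih (fun d hd => hss d (by simp [hd])) l acc

theorem pv_split_strip (l : List Char) :
    PySem.Chars.split₀ (PySem.Chars.strip l) = PySem.Chars.split₀ l := by
  unfold PySem.Chars.split₀ PySem.Chars.strip PySem.Chars.lstrip PySem.Chars.rstrip
  have hrs : ∀ (x : List Char),
      PySem.Chars.split₀.go ((x.reverse.dropWhile PySem.Chars.isspace).reverse) [] [] =
        PySem.Chars.split₀.go x [] [] := by
    intro x
    have hx : (x.reverse.dropWhile PySem.Chars.isspace).reverse ++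
        (x.reverse.takeWhile PySem.Chars.isspace).reverse = x := by
      rw [← List.reverse_append, List.takeWhile_append_dropWhile, List.reverse_reverse]
    conv_rhs => rw [← hx]
    rw [pv_sg_append_sp]
    intro c hc
    exact List.mem_takeWhile_imp (List.mem_reverse.mp hc)
  rw [hrs]
  have hls : l.takeWhile PySem.Chars.isspace ++ l.dropWhile PySem.Chars.isspace = l :=
    List.takeWhile_append_dropWhile
  conv_rhs => rw [← hls]
  rw [pv_sg_leading]
  intro c hc
  exact List.mem_takeWhile_imp hc

-- first colon token -------------------------------------------------------

def pvHasColon (p : List Char) : Bool := p.contains ':'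

theorem pv_firstColonTok_eq (xs : List (List Char)) :
    pvFirstColonTok xs = ((xs.find? pvHasColon).getD []) := by
  induction xs with
  | nil => simp [pvFirstColonTok]
  | cons p rest ih =>
    rw [pvFirstColonTok, pv_isIn_colon, List.find?_cons]
    by_cases h : p.contains ':' = true
    · rw [if_pos h, show pvHasColon p = true from h]
      rfl
    · have hb : p.contains ':' = false := by simpa using h
      rw [if_neg h, show pvHasColon p = false from hb]
      exact ih

theorem pv_contains_ne_nil {tok : List Char} (h : ':' ∈ tok) : tok ≠ [] := by
  intro hnil; subst hnil; simp at h

-- the per-line scanner agrees with split₀ ---------------------------------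

theorem pv_step2_some (l : List Char) : ∀ (tok : List Char) (t : List Char),
    (l.foldl pvStep2 (tok, some t)).2 = some t := by
  induction l with
  | nil => intro tok t; rfl
  | cons c rest ih =>
    intro tok t
    by_cases hsp : PySem.Chars.isspace c
    · rw [List.foldl_cons, show pvStep2 (tok, some t) c = ([], some t) from by simp [pvStep2, hsp]]
      exact ih [] t
    · rw [List.foldl_cons, show pvStep2 (tok, some t) c = (tok ++ [c], some t) from by simp [pvStep2, hsp]]
      exact ih (tok ++ [c]) t

theorem pv_scan_line (l : List Char) (hl : ∀ c ∈ l, pvLineOK c) : ∀ (tok : List Char),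
    pvFin (l.foldl pvStep2 (tok, none)) =
      ((PySem.Chars.split₀.go l tok.reverse []).find? pvHasColon) := by
  induction l with
  | nil =>
    intro tok
    rw [pv_sg_nil, List.foldl_nil]
    by_cases hm : ':' ∈ tok
    · have htok : tok ≠ [] := pv_contains_ne_nil hm
      have hfin : pvFin (tok, none) = some tok := by simp [pvFin, hm]
      rw [hfin]
      simp [List.isEmpty_iff, htok, List.find?_cons, pvHasColon, hm]
    · have hfin : pvFin (tok, none) = none := by simp [pvFin, hm]
      rw [hfin]
      by_cases htok : tok = []
      · subst htok; simp
      · simp [List.isEmpty_iff, htok, List.find?_cons, pvHasColon, hm]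
  | cons c rest ih =>
    intro tok
    have ih' := ih (fun d hd => hl d (by simp [hd]))
    rw [List.foldl_cons, pv_sg_cons]
    by_cases hsp : PySem.Chars.isspace c
    · by_cases hm : ':' ∈ tok
      · have htok : tok ≠ [] := pv_contains_ne_nil hm
        have hstep : pvStep2 (tok, none) c = ([], some tok) := by simp [pvStep2, hsp, hm]
        rw [hstep]
        have hfin : pvFin (rest.foldl pvStep2 ([], some tok)) = some tok := by
          unfold pvFin
          rw [pv_step2_some rest [] tok]
          simp
        rw [hfin, if_pos hsp,
          if_neg (show ¬(tok.reverse.isEmpty = true) from by simp [List.isEmpty_iff, htok]),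
          pv_sg_acc rest [] [tok.reverse.reverse]]
        simp [List.find?_cons, pvHasColon, hm]
      · have hstep : pvStep2 (tok, none) c = ([], none) := by simp [pvStep2, hsp, hm]
        rw [hstep]
        by_cases htok : tok = []
        · subst htok
          rw [if_pos hsp, if_pos (show ([] : List Char).reverse.isEmpty = true from rfl)]
          simpa using ih' []
        · rw [if_pos hsp,
            if_neg (show ¬(tok.reverse.isEmpty = true) from by simp [List.isEmpty_iff, htok]),
            pv_sg_acc rest [] [tok.reverse.reverse]]
          have hgo : ([tok.reverse.reverse].reverse : List (List Char)) ++
              PySem.Chars.split₀.go rest [] [] = tok :: PySem.Chars.split₀.go rest [] [] := by simp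
          rw [hgo, List.find?_cons, show pvHasColon tok = false from by simpa [pvHasColon] using hm]
          simpa using ih' []
    · have hstep : pvStep2 (tok, none) c = (tok ++ [c], none) := by simp [pvStep2, hsp]
      rw [hstep, if_neg (show ¬(PySem.Chars.isspace c = true) from hsp)]
      have hrev : c :: tok.reverse = (tok ++ [c]).reverse := by simp
      rw [hrev]
      exact ih' (tok ++ [c])

-- A's loop body in scanner terms ------------------------------------------

theorem pv_aline_eq (l : List Char) (hl : ∀ c ∈ l, pvLineOK c) (P : List (List Char)) :
    pvALine P l = P ++ pvFlushOut (l.foldl pvStep2 ([], none)) := by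
  have hscan : pvFin (l.foldl pvStep2 ([], none)) =
      ((PySem.Chars.split₀ l).find? pvHasColon) := by
    simpa [PySem.Chars.split₀] using pv_scan_line l hl []
  have hA : pvALine P l =
      (if (PySem.Chars.strip l).isEmpty = true then P
       else
         if (pvFirstColonTok (PySem.Chars.split₀ (PySem.Chars.strip l))).isEmpty = true then P
         else P ++ [pvRstripComma (pvFirstColonTok (PySem.Chars.split₀ (PySem.Chars.strip l)))]) := rfl
  have hF : pvFlushOut (l.foldl pvStep2 ([], none)) =
      (match (PySem.Chars.split₀ l).find? pvHasColon with
       | some t => [pvRstripComma t]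
       | none => []) := by
    unfold pvFlushOut
    rw [hscan]
  rw [hA, hF, pv_firstColonTok_eq, pv_split_strip]
  rcases hf : (PySem.Chars.split₀ l).find? pvHasColon with _ | t
  · by_cases hline : (PySem.Chars.strip l).isEmpty = true <;> simp [hline]
  · have ht : ':' ∈ t := by
      have := List.find?_some hf
      simpa [pvHasColon] using this
    have hne : t ≠ [] := pv_contains_ne_nil ht
    by_cases hline : (PySem.Chars.strip l).isEmpty = true
    · exfalso
      have hs : PySem.Chars.strip l = [] := List.isEmpty_iff.mp hline
      have hnil : PySem.Chars.split₀ l = [] := by rw [← pv_split_strip, hs]; rfl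
      rw [hnil] at hf
      simp at hf
    · simp [hline, List.isEmpty_iff, hne]

-- B step facts -------------------------------------------------------------

theorem pv_bstep_line (c : Char) (hc : pvLineOK c) (P : List (List Char)) (tok : List Char)
    (lt : Option (List Char)) :
    pvBStep (P, tok, lt) c = (P, pvStep2 (tok, lt) c) := by
  obtain ⟨hd, h1, h2⟩ := hc
  have hsp := pv_space_eq c hd h1 h2
  have hbr : (['\n', '\r'].contains c) = false := by simp [h1, h2]
  unfold pvBStep pvStep2
  rw [hsp, hbr]
  by_cases h : PySem.Chars.isspace c <;> simp [h]

theorem pv_bstep_break (c : Char) (hc : c = '\n' ∨ c = '\r') (P : List (List Char)) (tok : List Char)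
    (lt : Option (List Char)) :
    pvBStep (P, tok, lt) c = (P ++ pvFlushOut (tok, lt), [], none) := by
  have h1 : ([' ', '\t', '\n', '\r'].contains c) = true := by
    rcases hc with rfl | rfl <;> decide
  have h2 : (['\n', '\r'].contains c) = true := by
    rcases hc with rfl | rfl <;> decide
  unfold pvBStep pvFlushOut pvFin
  rw [h1, h2]
  by_cases hm : ':' ∈ tok <;> cases lt <;> simp [hm]

theorem pv_bfinish_eq (P : List (List Char)) (tok : List Char) (lt : Option (List Char)) :
    pvBFinish (P, tok, lt) = P ++ pvFlushOut (tok, lt) := by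
  unfold pvBFinish pvFlushOut pvFin
  by_cases hm : ':' ∈ tok <;> cases lt <;> simp [hm]

theorem pv_flushOut_nil : pvFlushOut ([], none) = [] := by rfl

-- splitlines.go facts ------------------------------------------------------

theorem pv_slg_nil (isB : Char → Bool) (cur : List Char) (acc : List (List Char)) :
    PySem.Chars.splitlines.go isB [] cur acc =
      (if cur.isEmpty then acc.reverse else (cur.reverse :: acc).reverse) := by
  simp [PySem.Chars.splitlines.go]

theorem pv_slg_rn (isB : Char → Bool) (rest cur : List Char) (acc : List (List Char)) :
    PySem.Chars.splitlines.go isB ('\r' :: '\n' :: rest) cur acc =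
      PySem.Chars.splitlines.go isB rest [] (cur.reverse :: acc) := by
  rw [PySem.Chars.splitlines.go]

theorem pv_slg_cons (isB : Char → Bool) (c : Char) (rest cur : List Char) (acc : List (List Char))
    (h : ¬(c = '\r' ∧ rest.head? = some '\n')) :
    PySem.Chars.splitlines.go isB (c :: rest) cur acc =
      (if isB c then PySem.Chars.splitlines.go isB rest [] (cur.reverse :: acc)
       else PySem.Chars.splitlines.go isB rest (c :: cur) acc) := by
  cases rest with
  | nil => simp [PySem.Chars.splitlines.go]
  | cons d tl =>
    by_cases hd : d = '\n'
    · subst hd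
      have hc : c ≠ '\r' := fun hc => h ⟨hc, rfl⟩
      rw [PySem.Chars.splitlines.go]
      simp [hc]
    · rw [PySem.Chars.splitlines.go]
      all_goals try (intro r hc' hdd; injection hdd with h3 _; exact hd h3)

theorem pv_slg_acc (isB : Char → Bool) : ∀ (n : ℕ) (s : List Char), s.length ≤ n →
    ∀ (cur : List Char) (acc : List (List Char)),
    PySem.Chars.splitlines.go isB s cur acc = acc.reverse ++ PySem.Chars.splitlines.go isB s cur [] := by
  intro n
  induction n with
  | zero =>
    intro s hs cur acc
    have : s = [] := List.eq_nil_of_length_eq_zero (Nat.le_zero.mp hs)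
    subst this
    rw [pv_slg_nil, pv_slg_nil]
    by_cases h : cur.isEmpty <;> simp [h]
  | succ n ih =>
    intro s hs cur acc
    cases s with
    | nil =>
      rw [pv_slg_nil, pv_slg_nil]
      by_cases h : cur.isEmpty <;> simp [h]
    | cons c rest =>
      by_cases hrn : c = '\r' ∧ rest.head? = some '\n'
      · obtain ⟨rfl, hh⟩ := hrn
        cases rest with
        | nil => simp at hh
        | cons d tl =>
          have : d = '\n' := by simpa using hh
          subst this
          rw [pv_slg_rn, pv_slg_rn]
          have htl : tl.length ≤ n := by simp at hs; omega
          rw [ih tl htl [] (cur.reverse :: acc), ih tl htl [] [cur.reverse]]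
          simp
      · rw [pv_slg_cons isB c rest cur acc hrn, pv_slg_cons isB c rest cur [] hrn]
        have hrest : rest.length ≤ n := by simp at hs; omega
        by_cases hb : isB c
        · simp only [hb, if_true]
          rw [ih rest hrest [] (cur.reverse :: acc), ih rest hrest [] [cur.reverse]]
          simp
        · simp only [hb, if_false]
          exact ih rest hrest (c :: cur) acc

-- the main induction -------------------------------------------------------

theorem pv_main (isB : Char → Bool)
    (hB : ∀ c, pvDomChar c = true → isB c = (decide (c = '\n') || decide (c = '\r'))) :
    ∀ (n : ℕ) (cs : List Char), cs.length ≤ n → (∀ c ∈ cs, pvDomChar c = true) →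
    ∀ (P : List (List Char)) (curA : List Char) (tok : List Char) (lt : Option (List Char)),
      (∀ c ∈ curA, pvLineOK c) →
      curA.reverse.foldl pvStep2 ([], none) = (tok, lt) →
      (PySem.Chars.splitlines.go isB cs curA []).foldl pvALine P =
        pvBFinish (cs.foldl pvBStep (P, tok, lt)) := by
  intro n
  induction n with
  | zero =>
    intro cs hcs hdom P curA tok lt hcur hst
    have : cs = [] := List.eq_nil_of_length_eq_zero (Nat.le_zero.mp hcs)
    subst this
    rw [pv_slg_nil, List.foldl_nil, pv_bfinish_eq]
    by_cases h : curA.isEmpty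
    · have : curA = [] := List.isEmpty_iff.mp h
      subst this
      simp only [List.reverse_nil, List.foldl_nil] at hst
      injection hst with h1 h2
      subst h1; subst h2
      simp [pv_flushOut_nil, h]
    · rw [if_neg h]
      rw [show List.foldl pvALine P [curA.reverse].reverse = pvALine P curA.reverse from rfl]
      rw [pv_aline_eq curA.reverse (fun c hc => hcur c (List.mem_reverse.mp hc)) P, hst]
  | succ n ih =>
    intro cs hcs hdom P curA tok lt hcur hst
    cases cs with
    | nil =>
      rw [pv_slg_nil, List.foldl_nil, pv_bfinish_eq]
      by_cases h : curA.isEmpty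
      · have : curA = [] := List.isEmpty_iff.mp h
        subst this
        simp only [List.reverse_nil, List.foldl_nil] at hst
        injection hst with h1 h2
        subst h1; subst h2
        simp [pv_flushOut_nil, h]
      · rw [if_neg h]
        rw [show List.foldl pvALine P [curA.reverse].reverse = pvALine P curA.reverse from rfl]
        rw [pv_aline_eq curA.reverse (fun c hc => hcur c (List.mem_reverse.mp hc)) P, hst]
    | cons c rest =>
      have hflush : pvALine P curA.reverse = P ++ pvFlushOut (tok, lt) := by
        rw [pv_aline_eq curA.reverse (fun c hc => hcur c (List.mem_reverse.mp hc)) P, hst]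
      by_cases hrn : c = '\r' ∧ rest.head? = some '\n'
      · obtain ⟨rfl, hh⟩ := hrn
        cases rest with
        | nil => simp at hh
        | cons d tl =>
          have : d = '\n' := by simpa using hh
          subst this
          rw [pv_slg_rn]
          have htl : tl.length ≤ n := by simp at hcs; omega
          rw [pv_slg_acc isB tl.length tl le_rfl [] [curA.reverse]]
          rw [show (([curA.reverse].reverse : List (List Char)) ++
            PySem.Chars.splitlines.go isB tl [] []) =
            curA.reverse :: PySem.Chars.splitlines.go isB tl [] [] from by simp]
          rw [List.foldl_cons, hflush]
          rw [List.foldl_cons, pv_bstep_break '\r' (Or.inr rfl) P tok lt]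
          rw [List.foldl_cons, pv_bstep_break '\n' (Or.inl rfl) (P ++ pvFlushOut (tok, lt)) [] none]
          rw [pv_flushOut_nil, List.append_nil]
          exact ih tl htl (fun x hx => hdom x (by simp [hx])) (P ++ pvFlushOut (tok, lt)) [] [] none
            (by simp) rfl
      · rw [pv_slg_cons isB c rest curA [] hrn]
        have hrest : rest.length ≤ n := by simp at hcs; omega
        have hdc : pvDomChar c = true := hdom c (by simp)
        have hBc := hB c hdc
        by_cases hbr : c = '\n' ∨ c = '\r'
        · have hb : isB c = true := by
            rw [hBc]; rcases hbr with rfl | rfl <;> simp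
          rw [if_pos hb]
          rw [pv_slg_acc isB rest.length rest le_rfl [] [curA.reverse]]
          rw [show (([curA.reverse].reverse : List (List Char)) ++
            PySem.Chars.splitlines.go isB rest [] []) =
            curA.reverse :: PySem.Chars.splitlines.go isB rest [] [] from by simp]
          rw [List.foldl_cons, hflush]
          rw [List.foldl_cons, pv_bstep_break c hbr P tok lt]
          exact ih rest hrest (fun x hx => hdom x (by simp [hx])) (P ++ pvFlushOut (tok, lt)) [] [] none
            (by simp) rfl
        · rw [not_or] at hbr
          have hb : isB c = false := by
            rw [hBc]; simp [hbr.1, hbr.2]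
          have hok : pvLineOK c := ⟨hdc, hbr.1, hbr.2⟩
          rw [if_neg (by simp [hb])]
          rcases hstc : pvStep2 (tok, lt) c with ⟨tok2, lt2⟩
          have hcur2 : ∀ x ∈ c :: curA, pvLineOK x := by
            intro x hx
            rcases List.mem_cons.mp hx with rfl | hx
            · exact hok
            · exact hcur x hx
          have hst2 : (c :: curA).reverse.foldl pvStep2 ([], none) = (tok2, lt2) := by
            rw [List.reverse_cons, List.foldl_append, hst]
            simpa using hstc
          rw [List.foldl_cons, pv_bstep_line c hok P tok lt, hstc]
          exact ih rest hrest (fun x hx => hdom x (by simp [hx])) P (c :: curA) tok2 lt2 hcur2 hst2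
-- ===== VERDICT (by name: the statement is the Claim_ definition above) =====
theorem parse_pw_link_ports_py_spec : Claim_equal_parse_pw_link_ports_py := by
  intro output hdom
  unfold Spec_parse_pw_link_ports_py parse_pw_link_ports_py parse_pw_link_ports_py_alt
  have hdom' : ∀ c ∈ output.toList, pvDomChar c = true := by
    have h : pvDomStr output = true := hdom
    simpa [pvDomStr, List.all_eq_true] using h
  congr 1
  unfold PySem.Chars.splitlines
  exact pv_main _ (fun c hc => pv_break_eq _ rfl c hc) output.toList.length output.toList le_rfl
    hdom' [] [] [] none (by simp) rfl
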